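-- pv_equiv track=rewrite | github.com/jodyxha/QHG4 | tools_qdf/varitest.py | group_cols
-- ===== SOURCE A (Python) =====
-- def group_cols(row_args):
--     cols = [-1]*len(row_args)
--     curcol = 0
--     for icol in range(1, len(row_args)):
--         if cols[icol] < 0:
--             cols[icol] = curcol
--             curcol = curcol + 1
--         #-- end if
--
--         for icol2 in range(icol+1, len(row_args)):
--             if row_args[icol] ==  row_args[icol2]:
--                 if   cols[icol2] < 0:
--                     cols[icol2] = cols[icol]
--                 #-- end if
--             #-- end if
--         #-- end for
--     #-- end for
--     return cols
-- ===== SOURCE B (Python) =====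
-- def group_cols(row_args):
--     cols = [-1] * len(row_args)
--     reps = []
--     for v in row_args[1:]:
--         if v not in reps:
--             reps.append(v)
--     for i in range(1, len(row_args)):
--         cols[i] = reps.index(row_args[i])
--     return cols
-- ===== Notes on version B (the rewrite author's own statement) =====
-- stated objective: alternative
-- what changed: A propagates group ids with a quadratic nested scan that stamps cols[icol] onto every later equal unset entry; B instead builds the ordered list of distinct values of row_args[1:] in one pass and then fills cols[i] with each value's first-occurrence rank via reps.index.
import Mathlib
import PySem

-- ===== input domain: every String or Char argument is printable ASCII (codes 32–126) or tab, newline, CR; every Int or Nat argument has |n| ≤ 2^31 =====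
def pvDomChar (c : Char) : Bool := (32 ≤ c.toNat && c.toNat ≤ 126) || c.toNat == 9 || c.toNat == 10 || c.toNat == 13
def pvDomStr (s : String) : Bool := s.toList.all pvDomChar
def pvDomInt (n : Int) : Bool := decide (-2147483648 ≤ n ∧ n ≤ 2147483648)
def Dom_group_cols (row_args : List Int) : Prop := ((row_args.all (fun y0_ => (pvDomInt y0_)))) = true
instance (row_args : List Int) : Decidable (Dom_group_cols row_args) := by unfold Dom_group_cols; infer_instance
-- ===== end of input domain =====

-- B replaces A's quadratic pairwise-propagation of group ids by a first-occurrence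
-- list of representatives built in one scan plus an index lookup (objective: alternative decomposition).

-- ===== PORT A =====
-- inner loop: for icol2 in range(icol+1, len(row_args)): propagate cols[icol] to equal, unset entries
def gcInner (row : List Int) (icol : Nat) (cols : List Int) (icol2 : Nat) : List Int :=
  if h : icol2 < row.length then
    gcInner row icol
      (if row.getD icol 0 = row.getD icol2 0 ∧ cols.getD icol2 0 < 0
       then cols.set icol2 (cols.getD icol 0) else cols)
      (icol2 + 1)
  else cols
termination_by row.length - icol2
decreasing_by omega

-- outer loop: for icol in range(1, len(row_args))
def gcOuter (row : List Int) (cols : List Int) (curcol : Int) (icol : Nat) : List Int :=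
  if h : icol < row.length then
    let p := if cols.getD icol 0 < 0 then (cols.set icol curcol, curcol + 1) else (cols, curcol)
    gcOuter row (gcInner row icol p.1 (icol + 1)) p.2 (icol + 1)
  else cols
termination_by row.length - icol
decreasing_by omega

def group_cols (row_args : List Int) : List Int :=
  gcOuter row_args (List.replicate row_args.length (-1)) 0 1

-- ===== PORT B =====
-- if v not in reps: reps.append(v)
def gcIns (reps : List Int) (v : Int) : List Int :=
  if v ∈ reps then reps else reps ++ [v]

-- first pass over row_args[1:]: ordered list of distinct values
def gcReps (row : List Int) : List Int :=
  (PySem.List.slice row (some 1) none).foldl gcIns []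

-- second pass: cols[i] = reps.index(row_args[i]); reps.index never raises here since
-- every row_args[i] (i ≥ 1) was inserted into reps, so the getD 0 default is unreachable
def gcFill (row reps cols : List Int) (i : Nat) : List Int :=
  if h : i < row.length then
    gcFill row reps
      (cols.set i (((PySem.List.index? reps (row.getD i 0)).getD 0 : Nat) : Int))
      (i + 1)
  else cols
termination_by row.length - i
decreasing_by omega

def group_cols_alt (row_args : List Int) : List Int :=
  gcFill row_args (gcReps row_args) (List.replicate row_args.length (-1)) 1

-- ===== PRECONDITION & SPEC =====
def Spec_group_cols (row_args : List Int) (out : List Int) : Prop := out = group_cols_alt row_args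
instance (row_args : List Int) (out : List Int) : Decidable (Spec_group_cols row_args out) := by unfold Spec_group_cols; infer_instance

-- ===== CLAIM (what is proved, stated in full; the proofs are below) =====
def Claim_equal_group_cols : Prop := ∀ (row_args : List Int), Dom_group_cols row_args → Spec_group_cols row_args (group_cols row_args)

-- ===== LEMMAS AND PROOFS =====

-- the final group id of index i: first-occurrence rank of row[i] among row[1:]
def Rk (row : List Int) (i : Nat) : Int :=
  (((PySem.List.index? (gcReps row) (row.getD i 0)).getD 0 : Nat) : Int)

-- value at index i occurred at some position 1 ≤ j < icol
abbrev Seen (row : List Int) (icol i : Nat) : Prop :=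
  ∃ j, j < icol ∧ 1 ≤ j ∧ row.getD j 0 = row.getD i 0

theorem gset (l : List Int) (j i : Nat) (a : Int) :
    (l.set j a).getD i 0 = if i = j ∧ j < l.length then a else l.getD i 0 := by
  simp only [List.getD_eq_getElem?_getD, List.getElem?_set]
  split_ifs with h1 h2 h3 h3 <;> simp_all

theorem Rk_nonneg (row : List Int) (i : Nat) : 0 ≤ Rk row i := by
  simp [Rk]

theorem gcInner_length (row : List Int) (icol : Nat) (cols : List Int) (j : Nat) :
    (gcInner row icol cols j).length = cols.length := by
  fun_induction gcInner with
  | case1 cols j h ih =>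
    simp only [dite_eq_ite] at ih
    rw [ih]; split <;> simp
  | case2 => rfl

theorem gcFill_length (row reps cols : List Int) (i : Nat) :
    (gcFill row reps cols i).length = cols.length := by
  fun_induction gcFill with
  | case1 cols i h ih => rw [ih]; simp
  | case2 => rfl

theorem foldl_gcIns_prefix : ∀ (l reps : List Int), reps <+: l.foldl gcIns reps := by
  intro l
  induction l with
  | nil => intro reps; simp
  | cons v l ih =>
    intro reps
    refine List.IsPrefix.trans ?_ (ih (gcIns reps v))
    unfold gcIns; split
    · exact List.prefix_refl _
    · exact List.prefix_append _ _

theorem mem_foldl_gcIns : ∀ (l reps : List Int) (x : Int),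
    x ∈ l.foldl gcIns reps ↔ x ∈ reps ∨ x ∈ l := by
  intro l
  induction l with
  | nil => simp
  | cons v l ih =>
    intro reps x
    simp only [List.foldl_cons, ih, List.mem_cons]
    unfold gcIns; split <;> rename_i hv
    · constructor
      · rintro (h | h)
        · exact Or.inl h
        · exact Or.inr (Or.inr h)
      · rintro (h | h | h)
        · exact Or.inl h
        · subst h; exact Or.inl hv
        · exact Or.inr h
    · simp only [List.mem_append, List.mem_singleton]
      tauto

-- elementwise description of B's second pass
theorem gcFill_getD (row reps : List Int) : ∀ (k : Nat) (cols : List Int) (i : Nat),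
    row.length ≤ cols.length →
    (gcFill row reps cols k).getD i 0 =
      if k ≤ i ∧ i < row.length
      then (((PySem.List.index? reps (row.getD i 0)).getD 0 : Nat) : Int)
      else cols.getD i 0 := by
  intro k cols i hlen
  fun_induction gcFill row reps cols k generalizing i with
  | case1 cols k h ih =>
    rw [ih _ (by simpa using hlen)]
    rw [gset]
    split_ifs <;> simp_all <;> omega
  | case2 cols k h =>
    split_ifs <;> first | rfl | omega

-- elementwise description of A's inner loop
theorem gcInner_getD (row : List Int) (icol : Nat) : ∀ (j : Nat) (cols : List Int) (i : Nat),
    row.length ≤ cols.length → icol < j →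
    (gcInner row icol cols j).getD i 0 =
      if j ≤ i ∧ i < row.length ∧ row.getD i 0 = row.getD icol 0 ∧ cols.getD i 0 < 0
      then cols.getD icol 0 else cols.getD i 0 := by
  intro j cols i hlen hij
  fun_induction gcInner row icol cols j generalizing i with
  | case1 cols j h ih =>
    simp only [dite_eq_ite] at ih
    have hjlen : j < cols.length := lt_of_lt_of_le h hlen
    by_cases hc : row.getD icol 0 = row.getD j 0 ∧ cols.getD j 0 < 0
    · simp only [if_pos hc] at ih ⊢
      rw [ih i (by simpa using hlen) (by omega)]
      simp only [gset]
      obtain ⟨hc1, hc2⟩ := hc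
      by_cases hi : i = j
      · subst hi
        split_ifs <;> omega
      · split_ifs <;> omega
    · simp only [if_neg hc] at ih ⊢
      rw [ih i hlen (by omega)]
      by_cases hi : i = j
      · subst hi
        split_ifs <;> omega
      · split_ifs <;> omega
  | case2 cols j h =>
    split_ifs <;> first | rfl | omega

theorem gcReps_eq (row : List Int) : gcReps row = (row.drop 1).foldl gcIns [] := by
  simp [gcReps, PySem.List.slice_from_one]

theorem gdrop (l : List Int) (k m : Nat) : (l.drop k).getD m 0 = l.getD (k + m) 0 := by
  simp [List.getD_eq_getElem?_getD, List.getElem?_drop]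

theorem gtake (l : List Int) (k m : Nat) (h : m < k) : (l.take k).getD m 0 = l.getD m 0 := by
  simp [List.getD_eq_getElem?_getD, h]

theorem grepl (n i : Nat) (h : i < n) : (List.replicate n (-1 : Int)).getD i 0 = -1 := by
  simp [List.getD_eq_getElem?_getD, h]

theorem seen_succ (row : List Int) (icol i : Nat) :
    Seen row (icol + 1) i ↔ Seen row icol i ∨ (1 ≤ icol ∧ row.getD icol 0 = row.getD i 0) := by
  constructor
  · rintro ⟨j, hj2, hj1, hveq⟩
    by_cases hj : j = icol
    · subst hj; exact Or.inr ⟨hj1, hveq⟩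
    · exact Or.inl ⟨j, by omega, hj1, hveq⟩
  · rintro (⟨j, hj2, hj1, hveq⟩ | ⟨hic, hveq⟩)
    · exact ⟨j, by omega, hj1, hveq⟩
    · exact ⟨icol, by omega, hic, hveq⟩

theorem seen_iff_mem (row : List Int) (icol i : Nat) (h1 : 1 ≤ icol) (h2 : icol ≤ row.length) :
    Seen row icol i ↔ row.getD i 0 ∈ (row.drop 1).take (icol - 1) := by
  have hlen : ((row.drop 1).take (icol - 1)).length = icol - 1 := by
    simp [List.length_take]; omega
  rw [List.mem_iff_getElem]
  constructor
  · rintro ⟨j, hj2, hj1, hveq⟩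
    refine ⟨j - 1, by omega, ?_⟩
    have hjl : j - 1 < ((row.drop 1).take (icol - 1)).length := by omega
    rw [← List.getD_eq_getElem _ 0 hjl, gtake _ _ _ (by omega), gdrop]
    rw [show 1 + (j - 1) = j by omega, hveq]
  · rintro ⟨m, hm, hveq⟩
    refine ⟨m + 1, by omega, by omega, ?_⟩
    rw [← List.getD_eq_getElem _ 0 hm, gtake _ _ _ (by omega), gdrop] at hveq
    rw [show 1 + m = m + 1 by omega] at hveq
    exact hveq

theorem take_succ_getD (row : List Int) (icol : Nat) (h1 : 1 ≤ icol) (h : icol < row.length) :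
    (row.drop 1).take icol = (row.drop 1).take (icol - 1) ++ [row.getD icol 0] := by
  obtain ⟨m, rfl⟩ : ∃ m, icol = m + 1 := ⟨icol - 1, by omega⟩
  have hm2 : 1 + m < row.length := by omega
  rw [List.take_add_one]
  congr 1
  rw [List.getElem?_drop, List.getElem?_eq_getElem hm2]
  simp [List.getD_eq_getElem?_getD, List.getElem?_eq_getElem hm2, show m + 1 = 1 + m from by omega]

theorem dd_take_succ (row : List Int) (icol : Nat) (h1 : 1 ≤ icol) (h : icol < row.length) :
    ((row.drop 1).take icol).foldl gcIns [] =
      gcIns (((row.drop 1).take (icol - 1)).foldl gcIns []) (row.getD icol 0) := by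
  rw [take_succ_getD row icol h1 h, List.foldl_append]
  rfl

theorem rank_first (row : List Int) (icol : Nat) (h1 : 1 ≤ icol) (h : icol < row.length)
    (hnot : row.getD icol 0 ∉ (row.drop 1).take (icol - 1)) :
    Rk row icol = (((((row.drop 1).take (icol - 1)).foldl gcIns []).length : Nat) : Int) := by
  have hm1 : icol - 1 < (row.drop 1).length := by simp; omega
  have hsplit : row.drop 1 = (row.drop 1).take (icol - 1) ++
      (row.getD icol 0 :: (row.drop 1).drop icol) := by
    conv_lhs => rw [← List.take_append_drop (icol - 1) (row.drop 1)]
    congr 1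
    rw [List.drop_eq_getElem_cons hm1]
    congr 1
    · rw [← List.getD_eq_getElem _ 0 hm1, gdrop, show 1 + (icol - 1) = icol by omega]
    · congr 1; omega
  have hnotR : row.getD icol 0 ∉ ((row.drop 1).take (icol - 1)).foldl gcIns [] := by
    rw [mem_foldl_gcIns]
    rintro (hx | hx)
    · simp at hx
    · exact hnot hx
  have hreps : gcReps row = ((row.drop 1).drop icol).foldl gcIns
      ((((row.drop 1).take (icol - 1)).foldl gcIns []) ++ [row.getD icol 0]) := by
    rw [gcReps_eq]
    conv_lhs => rw [hsplit]
    rw [List.foldl_append, List.foldl_cons]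
    congr 1
    rw [gcIns, if_neg hnotR]
  obtain ⟨t, ht⟩ := foldl_gcIns_prefix ((row.drop 1).drop icol)
    ((((row.drop 1).take (icol - 1)).foldl gcIns []) ++ [row.getD icol 0])
  unfold Rk
  rw [hreps, ← ht]
  rw [PySem.List.index?_append_of_mem t (by simp)]
  rw [PySem.List.index?_append_singleton_self _ _ hnotR]
  simp

theorem Rk_congr (row : List Int) (i j : Nat) (h : row.getD i 0 = row.getD j 0) :
    Rk row i = Rk row j := by
  unfold Rk; rw [h]

-- one outer iteration turns the icol-invariant into the (icol+1)-invariant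
theorem inv_step (row cols1 : List Int) (icol : Nat) (h1 : 1 ≤ icol) (h : icol < row.length)
    (hlen : cols1.length = row.length)
    (hicolval : cols1.getD icol 0 = Rk row icol)
    (hinv1 : ∀ i, i < row.length → i ≠ icol →
      cols1.getD i 0 = if 1 ≤ i ∧ Seen row icol i then Rk row i else -1) :
    ∀ i, i < row.length → (gcInner row icol cols1 (icol + 1)).getD i 0 =
      if 1 ≤ i ∧ Seen row (icol + 1) i then Rk row i else -1 := by
  intro i hi
  rw [gcInner_getD row icol (icol + 1) cols1 i (le_of_eq hlen.symm) (by omega)]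
  by_cases hi0 : 1 ≤ i
  · by_cases hii : i = icol
    · subst hii
      rw [if_neg (by omega), hicolval,
        if_pos ⟨hi0, ⟨i, by omega, hi0, rfl⟩⟩]
    · have hV := hinv1 i hi hii
      by_cases hgt : icol + 1 ≤ i
      · by_cases hveq : row.getD i 0 = row.getD icol 0
        · have hRkeq := Rk_congr row i icol hveq
          by_cases hseen : Seen row icol i
          · have hge : ¬ cols1.getD i 0 < 0 := by
              rw [hV, if_pos ⟨hi0, hseen⟩]; have := Rk_nonneg row i; omega
            rw [if_neg (fun hh => hge hh.2.2.2), hV, if_pos ⟨hi0, hseen⟩,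
              if_pos ⟨hi0, (seen_succ row icol i).2 (Or.inl hseen)⟩]
          · have hVlt : cols1.getD i 0 < 0 := by
              rw [hV, if_neg (fun hh => hseen hh.2)]; omega
            rw [if_pos ⟨hgt, hi, hveq, hVlt⟩, hicolval, ← hRkeq,
              if_pos ⟨hi0, (seen_succ row icol i).2 (Or.inr ⟨h1, hveq.symm⟩)⟩]
        · rw [if_neg (fun hh => hveq hh.2.2.1), hV]
          have hsucc : Seen row (icol + 1) i ↔ Seen row icol i := by
            rw [seen_succ]
            constructor
            · rintro (hs | ⟨_, hs⟩)
              · exact hs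
              · exact absurd hs.symm hveq
            · exact Or.inl
          simp only [hsucc]
      · have hseen : Seen row icol i := ⟨i, by omega, hi0, rfl⟩
        have hsucc : Seen row (icol + 1) i := (seen_succ row icol i).2 (Or.inl hseen)
        rw [if_neg (by omega), hV, if_pos ⟨hi0, hseen⟩, if_pos ⟨hi0, hsucc⟩]
  · have hi00 : i = 0 := by omega
    subst hi00
    rw [if_neg (by omega), hinv1 0 hi (by omega), if_neg (by omega), if_neg (by omega)]

-- the outer-loop invariant: after processing columns 1..icol-1, each set entry holds
-- its value's first-occurrence rank and curcol counts the distinct values seen so far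
theorem gcOuter_inv (row : List Int) : ∀ (k icol : Nat) (cols : List Int) (c : Int),
    row.length - icol ≤ k → 1 ≤ icol → cols.length = row.length →
    (∀ i, i < row.length →
      cols.getD i 0 = if 1 ≤ i ∧ Seen row icol i then Rk row i else -1) →
    c = ((((row.drop 1).take (icol - 1)).foldl gcIns []).length : Nat) →
    ∀ i, i < row.length →
      (gcOuter row cols c icol).getD i 0 = if 1 ≤ i then Rk row i else -1 := by
  intro k
  induction k with
  | zero =>
    intro icol cols c hk h1 hlen hinv hc i hi
    rw [gcOuter, dif_neg (by omega)]
    rw [hinv i hi]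
    by_cases hi0 : 1 ≤ i
    · rw [if_pos ⟨hi0, ⟨i, by omega, hi0, rfl⟩⟩, if_pos hi0]
    · rw [if_neg (fun hh => hi0 hh.1), if_neg hi0]
  | succ k ih =>
    intro icol cols c hk h1 hlen hinv hc i hi
    by_cases h : icol < row.length
    · rw [gcOuter, dif_pos h]
      have hBiff : cols.getD icol 0 < 0 ↔ ¬ Seen row icol icol := by
        rw [hinv icol h]
        by_cases hs : Seen row icol icol
        · rw [if_pos ⟨h1, hs⟩]
          have := Rk_nonneg row icol
          constructor
          · omega
          · intro hn; exact absurd hs hn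
        · rw [if_neg (fun hh => hs hh.2)]
          constructor
          · intro _; exact hs
          · intro _; omega
      have hmem : Seen row icol icol ↔ row.getD icol 0 ∈ (row.drop 1).take (icol - 1) :=
        seen_iff_mem row icol icol h1 (by omega)
      by_cases hC : cols.getD icol 0 < 0
      · simp only [if_pos hC]
        have hnotseen : ¬ Seen row icol icol := hBiff.1 hC
        have hnotmem : row.getD icol 0 ∉ (row.drop 1).take (icol - 1) := fun hm =>
          hnotseen (hmem.2 hm)
        have hnotR : row.getD icol 0 ∉ ((row.drop 1).take (icol - 1)).foldl gcIns [] := by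
          rw [mem_foldl_gcIns]
          rintro (hx | hx)
          · simp at hx
          · exact hnotmem hx
        have hrk : Rk row icol = c := by rw [rank_first row icol h1 h hnotmem, hc]
        have hlen1 : (cols.set icol c).length = row.length := by simpa using hlen
        refine ih (icol + 1) (gcInner row icol (cols.set icol c) (icol + 1)) (c + 1)
          (by omega) (by omega) (by rw [gcInner_length]; exact hlen1) ?_ ?_ i hi
        · refine inv_step row (cols.set icol c) icol h1 h hlen1 ?_ ?_
          · rw [gset, if_pos ⟨rfl, by omega⟩, hrk]
          · intro j hj hjne
            rw [gset, if_neg (fun hh => hjne hh.1), hinv j hj]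
        · rw [show icol + 1 - 1 = icol from by omega, dd_take_succ row icol h1 h,
            gcIns, if_neg hnotR]
          simp [hc]
      · simp only [if_neg hC]
        have hseen : Seen row icol icol := by
          by_contra hn
          exact hC (hBiff.2 hn)
        have hmemR : row.getD icol 0 ∈ ((row.drop 1).take (icol - 1)).foldl gcIns [] := by
          rw [mem_foldl_gcIns]
          exact Or.inr (hmem.1 hseen)
        refine ih (icol + 1) (gcInner row icol cols (icol + 1)) c
          (by omega) (by omega) (by rw [gcInner_length]; exact hlen) ?_ ?_ i hi
        · refine inv_step row cols icol h1 h hlen ?_ ?_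
          · rw [hinv icol h, if_pos ⟨h1, hseen⟩]
          · intro j hj _
            exact hinv j hj
        · rw [show icol + 1 - 1 = icol from by omega, dd_take_succ row icol h1 h,
            gcIns, if_pos hmemR, hc]
    · rw [gcOuter, dif_neg h]
      rw [hinv i hi]
      by_cases hi0 : 1 ≤ i
      · rw [if_pos ⟨hi0, ⟨i, by omega, hi0, rfl⟩⟩, if_pos hi0]
      · rw [if_neg (fun hh => hi0 hh.1), if_neg hi0]

theorem gcOuter_length (row : List Int) : ∀ (k icol : Nat) (cols : List Int) (c : Int),
    row.length - icol ≤ k → (gcOuter row cols c icol).length = cols.length := by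
  intro k
  induction k with
  | zero =>
    intro icol cols c hk
    rw [gcOuter, dif_neg (by omega)]
  | succ k ih =>
    intro icol cols c hk
    by_cases h : icol < row.length
    · rw [gcOuter, dif_pos h]
      by_cases hC : cols.getD icol 0 < 0
      · simp only [if_pos hC]
        rw [ih (icol + 1) _ _ (by omega), gcInner_length]
        simp
      · simp only [if_neg hC]
        rw [ih (icol + 1) _ _ (by omega), gcInner_length]
    · rw [gcOuter, dif_neg h]

-- ===== VERDICT (by name: the statement is the Claim_ definition above) =====
theorem group_cols_spec : Claim_equal_group_cols := by
  intro row _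
  show group_cols row = group_cols_alt row
  unfold group_cols group_cols_alt
  have hlenA : (gcOuter row (List.replicate row.length (-1)) 0 1).length = row.length := by
    rw [gcOuter_length row row.length 1 _ _ (by omega)]; simp
  have hlenB : (gcFill row (gcReps row) (List.replicate row.length (-1)) 1).length
      = row.length := by
    rw [gcFill_length]; simp
  apply List.ext_getElem (by rw [hlenA, hlenB])
  intro i hiA hiB
  have hi : i < row.length := by omega
  rw [← List.getD_eq_getElem _ 0 hiA, ← List.getD_eq_getElem _ 0 hiB]
  rw [gcOuter_inv row row.length 1 (List.replicate row.length (-1)) 0 (by omega) (by omega)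
    (by simp) ?_ ?_ i hi]
  · rw [gcFill_getD row (gcReps row) 1 _ i (by simp)]
    by_cases hi0 : 1 ≤ i
    · rw [if_pos hi0, if_pos ⟨hi0, hi⟩]
      rfl
    · rw [if_neg hi0, if_neg (by omega), grepl _ _ hi]
  · intro j hj
    have hns : ¬ (1 ≤ j ∧ Seen row 1 j) := by
      rintro ⟨_, j', hlt, hge, _⟩
      omega
    rw [grepl _ _ hj, if_neg hns]
  · simp
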